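-- pv_equiv track=rewrite | github.com/fuyaozhao1018/pattern | ttt/n9_convolution_agent.py | line_winner
-- ===== SOURCE A (Python) =====
-- from typing import Dict, List, Tuple, Optional
--
-- K = 4
--
-- def line_winner(seq: List[str], k: int = K) -> Optional[str]:
--     """Check if any player has k consecutive in seq."""
--     for player in ('X', 'O'):
--         run = 0
--         for c in seq:
--             run = run + 1 if c == player else 0
--             if run >= k:
--                 return player
--     return None
-- ===== SOURCE B (Python) =====
-- K = 4
--
-- def line_winner(seq, k=K):
--     """Check if any player has k consecutive in seq."""
--     x_run = o_run = 0
--     x_found = o_found = False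
--     for c in seq:
--         x_run = x_run + 1 if c == 'X' else 0
--         o_run = o_run + 1 if c == 'O' else 0
--         if x_run >= k:
--             x_found = True
--         if o_run >= k:
--             o_found = True
--     return 'X' if x_found else ('O' if o_found else None)
-- ===== Notes on version B (the rewrite author's own statement) =====
-- stated objective: alternative
-- what changed: Replaces A's two sequential early-returning scans (one per player) with a single pass maintaining both players' run counters and found flags simultaneously, deciding the winner after the loop.
import Mathlib
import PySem

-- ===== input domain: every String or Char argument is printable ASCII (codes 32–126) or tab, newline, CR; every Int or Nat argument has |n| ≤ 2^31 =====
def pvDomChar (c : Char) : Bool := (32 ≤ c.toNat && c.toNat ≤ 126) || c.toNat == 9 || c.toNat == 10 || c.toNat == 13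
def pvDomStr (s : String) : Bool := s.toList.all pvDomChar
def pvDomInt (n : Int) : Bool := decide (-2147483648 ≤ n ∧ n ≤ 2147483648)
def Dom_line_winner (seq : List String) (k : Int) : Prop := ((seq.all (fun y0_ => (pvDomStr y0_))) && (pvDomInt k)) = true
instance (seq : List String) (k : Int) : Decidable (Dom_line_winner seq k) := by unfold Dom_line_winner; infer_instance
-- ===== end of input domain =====

-- ===== PORT A =====
-- B differs from A by one decomposition: one fused pass with two run counters and two
-- found flags instead of A's two sequential early-returning per-player scans.

-- A's inner 'for c in seq' loop for one player, with early return on run >= k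
def runLoopA (player : String) (k : Int) : List String → Int → Bool
  | [], _ => false
  | c :: rest, run =>
    let run' : Int := if c == player then run + 1 else 0
    if k ≤ run' then true else runLoopA player k rest run'

-- A's outer loop over ('X', 'O') with early return, unrolled
def line_winner (seq : List String) (k : Int) : Option String :=
  if runLoopA "X" k seq 0 then some "X"
  else if runLoopA "O" k seq 0 then some "O"
  else none

-- ===== PORT B =====
-- one iteration of B's single loop over seq, state (x_run, o_run, x_found, o_found)
def stepB (k : Int) (s : Int × Int × Bool × Bool) (c : String) : Int × Int × Bool × Bool :=
  let xr : Int := if c == "X" then s.1 + 1 else 0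
  let orr : Int := if c == "O" then s.2.1 + 1 else 0
  (xr, orr, s.2.2.1 || decide (k ≤ xr), s.2.2.2 || decide (k ≤ orr))

def line_winner_alt (seq : List String) (k : Int) : Option String :=
  let s := seq.foldl (stepB k) (0, 0, false, false)
  if s.2.2.1 then some "X"
  else if s.2.2.2 then some "O"
  else none

-- ===== PRECONDITION & SPEC =====
def Spec_line_winner (seq : List String) (k : Int) (out : Option String) : Prop := out = line_winner_alt seq k
instance (seq : List String) (k : Int) (out : Option String) : Decidable (Spec_line_winner seq k out) := by unfold Spec_line_winner; infer_instance

-- ===== CLAIM (what is proved, stated in full; the proofs are below) =====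
def Claim_equal_line_winner : Prop := ∀ (seq : List String) (k : Int), Dom_line_winner seq k → Spec_line_winner seq k (line_winner seq k)

-- ===== LEMMAS AND PROOFS =====

-- one player's slice of B's state: (run, found)
def gOne (player : String) (k : Int) (s : Int × Bool) (c : String) : Int × Bool :=
  let r : Int := if c == player then s.1 + 1 else 0
  (r, s.2 || decide (k ≤ r))

-- B's fused fold is the pair of the two per-player folds
theorem foldB_split (k : Int) (seq : List String) :
    ∀ (x o : Int) (fx fo : Bool),
    seq.foldl (stepB k) (x, o, fx, fo) =
      ((seq.foldl (gOne "X" k) (x, fx)).1, (seq.foldl (gOne "O" k) (o, fo)).1,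
       (seq.foldl (gOne "X" k) (x, fx)).2, (seq.foldl (gOne "O" k) (o, fo)).2) := by
  induction seq with
  | nil => intro x o fx fo; rfl
  | cons c rest ih =>
    intro x o fx fo
    simp only [List.foldl_cons, stepB, gOne]
    exact ih _ _ _ _

-- the found flag is sticky
theorem gOne_sticky (player : String) (k : Int) (seq : List String) :
    ∀ (r : Int), (seq.foldl (gOne player k) (r, true)).2 = true := by
  induction seq with
  | nil => intro r; rfl
  | cons c rest ih =>
    intro r
    simp only [List.foldl_cons, gOne, Bool.true_or]
    exact ih _

-- A's early-returning per-player scan equals the flag of B's per-player fold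
theorem runLoopA_eq_fold (player : String) (k : Int) (seq : List String) :
    ∀ (run : Int), runLoopA player k seq run = (seq.foldl (gOne player k) (run, false)).2 := by
  induction seq with
  | nil => intro run; rfl
  | cons c rest ih =>
    intro run
    by_cases h : k ≤ (if c == player then run + 1 else 0 : Int)
    · simp only [runLoopA, List.foldl_cons, gOne, if_pos h, decide_eq_true h, Bool.true_or]
      exact (gOne_sticky player k rest _).symm
    · simp only [runLoopA, List.foldl_cons, gOne, if_neg h, decide_eq_false h, Bool.or_false]
      exact ih _

-- ===== VERDICT (by name: the statement is the Claim_ definition above) =====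
theorem line_winner_spec : Claim_equal_line_winner := by
  intro seq k _
  unfold Spec_line_winner line_winner line_winner_alt
  rw [foldB_split, runLoopA_eq_fold, runLoopA_eq_fold]
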